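-- pv_equiv track=rewrite | github.com/ivoadf/PT_NER_DL | code/bootstrapping/dictionary_annotate.py | process_tagged_sub_text
-- ===== SOURCE A (Python) =====
-- def process_tagged_sub_text(text):
--     lines = text.split('\n')
--     if len(lines) == 1:
--         return lines[0]+'\tS-PER\n'
--     result = lines[0]+'\tB-PER\n'
--     for line in lines[1:-1]:
--         result += line+'\tI-PER\n'
--     result += lines[-1]+'\tE-PER\n'
--     return result
-- ===== SOURCE B (Python) =====
-- def process_tagged_sub_text(text):
--     lines = text.split('\n')
--     n = len(lines)
--     tags = ['S-PER'] if n == 1 else ['B-PER'] + ['I-PER'] * (n - 2) + ['E-PER']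
--     return ''.join(line + '\t' + tag + '\n' for line, tag in zip(lines, tags))
-- ===== Notes on version B (the rewrite author's own statement) =====
-- stated objective: alternative
-- what changed: B first builds the BIO tag sequence as a data value (['S-PER'] or ['B-PER'] + ['I-PER']*(n-2) + ['E-PER']) and then produces the output in one join over zip(lines, tags), replacing A's first-line/middle-slice/last-line branch-and-accumulate structure.
import Mathlib
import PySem

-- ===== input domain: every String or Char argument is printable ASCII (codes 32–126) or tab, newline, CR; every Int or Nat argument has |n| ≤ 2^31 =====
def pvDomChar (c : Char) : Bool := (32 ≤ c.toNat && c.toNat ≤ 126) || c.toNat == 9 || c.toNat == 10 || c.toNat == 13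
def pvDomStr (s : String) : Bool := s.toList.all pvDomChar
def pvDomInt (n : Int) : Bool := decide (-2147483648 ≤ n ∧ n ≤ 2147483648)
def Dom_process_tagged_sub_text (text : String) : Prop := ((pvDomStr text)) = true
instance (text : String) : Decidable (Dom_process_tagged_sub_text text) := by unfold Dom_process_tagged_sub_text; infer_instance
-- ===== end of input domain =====

-- B builds the BIO tag list as data (['S-PER'] / ['B-PER'] + ['I-PER']*(n-2) + ['E-PER']) and joins
-- it with the lines in one zip+join pass, instead of A's first/middle-slice/last accumulation (alternative decomposition, same cost).


-- ===== PORT A =====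
-- 'text.split("\n")' never raises (separator nonempty), so the '.getD []' default is unreachable.
def process_tagged_sub_text (text : String) : String :=
  let lines := (PySem.Str.split? text "\n").getD []
  if lines.length == 1 then
    PySem.List.pyGetD lines 0 "" ++ "\tS-PER\n"
  else
    let result := PySem.List.pyGetD lines 0 "" ++ "\tB-PER\n"
    let result := (PySem.List.slice lines (some 1) (some (-1))).foldl
      (fun acc line => acc ++ line ++ "\tI-PER\n") result
    result ++ PySem.List.pyGetD lines (-1) "" ++ "\tE-PER\n"

-- ===== PORT B =====
def process_tagged_sub_text_alt (text : String) : String :=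
  let lines := (PySem.Str.split? text "\n").getD []
  let n := lines.length
  let tags := if n == 1 then ["S-PER"] else "B-PER" :: (List.replicate (n - 2) "I-PER" ++ ["E-PER"])
  PySem.Str.join "" ((lines.zip tags).map (fun p => p.1 ++ "\t" ++ p.2 ++ "\n"))

-- ===== PRECONDITION & SPEC =====
def Spec_process_tagged_sub_text (text : String) (out : String) : Prop := out = process_tagged_sub_text_alt text
instance (text : String) (out : String) : Decidable (Spec_process_tagged_sub_text text out) := by unfold Spec_process_tagged_sub_text; infer_instance

-- ===== CLAIM (what is proved, stated in full; the proofs are below) =====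
def Claim_equal_process_tagged_sub_text : Prop := ∀ (text : String), Dom_process_tagged_sub_text text → Spec_process_tagged_sub_text text (process_tagged_sub_text text)

-- ===== LEMMAS AND PROOFS =====

-- str.split with a nonempty separator always yields at least one piece.
theorem splitOn_go_ne_nil (sep : List Char) : ∀ (fuel : Nat) (l cur : List Char) (acc : List (List Char)),
    PySem.Chars.splitOn.go sep fuel l cur acc ≠ [] := by
  intro fuel
  induction fuel with
  | zero => intro l cur acc; simp [PySem.Chars.splitOn.go]
  | succ n ih =>
    intro l cur acc
    rcases l with _ | ⟨c, rest⟩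
    · simp [PySem.Chars.splitOn.go]
    · rw [PySem.Chars.splitOn.go]
      split <;> apply ih

theorem lines_ne_nil (text : String) : (PySem.Str.split? text "\n").getD [] ≠ [] := by
  simp [PySem.Str.split?, PySem.Chars.split?]
  exact fun h => splitOn_go_ne_nil _ _ _ _ _ h

-- ''.join is plain concatenation.
theorem intersperse_nil_flatten (parts : List (List Char)) :
    (List.intersperse ([] : List Char) parts).flatten = parts.flatten := by
  induction parts with
  | nil => simp
  | cons x t ih =>
    rcases t with _ | ⟨y, t⟩
    · simp
    · simpa using ih

-- lines[1:-1] drops the first and last element.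
theorem slice_one_neg_one {α : Type} (xs : List α) :
    PySem.List.slice xs (some 1) (some (-1)) = xs.tail.dropLast := by
  rcases xs with _ | ⟨a, t⟩
  · simp [PySem.List.slice, PySem.List.clampIdx]
  · simp [PySem.List.slice, PySem.List.clampIdx, List.dropLast_eq_take]
    split_ifs <;> omega

-- A's accumulation loop, characterised on the character list.
theorem fold_toList (mid : List String) (acc : String) :
    (mid.foldl (fun acc line => acc ++ line ++ "\tI-PER\n") acc).toList
      = acc.toList ++ mid.flatMap (fun l => l.toList ++ "\tI-PER\n".toList) := by
  induction mid generalizing acc with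
  | nil => simp
  | cons x t ih => simp [ih, String.toList_append, List.append_assoc]

-- zipping with a constant replicate of matching length is a map.
theorem map_zip_replicate {α β γ : Type} (f : α × β → γ) (l : List α) (c : β) :
    (l.zip (List.replicate l.length c)).map f = l.map (fun x => f (x, c)) := by
  induction l with
  | nil => rfl
  | cons x t ih => simpa [List.replicate_succ] using ih

-- ===== VERDICT (by name: the statement is the Claim_ definition above) =====
theorem process_tagged_sub_text_spec : Claim_equal_process_tagged_sub_text := by
  intro text _
  unfold Spec_process_tagged_sub_text
  have hne := lines_ne_nil text
  obtain ⟨a, rest, hlr⟩ : ∃ a rest, (PySem.Str.split? text "\n").getD [] = a :: rest := by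
    rcases h : (PySem.Str.split? text "\n").getD [] with _ | ⟨a, rest⟩
    · exact absurd h hne
    · exact ⟨a, rest, rfl⟩
  simp only [process_tagged_sub_text, process_tagged_sub_text_alt, hlr]
  rcases List.eq_nil_or_concat rest with hr | ⟨mid, z, hr⟩
  · subst hr
    apply String.toList_inj.mp
    simp [PySem.Str.toList_join, String.toList_append]
  · subst hr
    rw [List.concat_eq_append]
    apply String.toList_inj.mp
    rw [if_neg (by simp), if_neg (by simp)]
    rw [slice_one_neg_one]
    have hdl : (mid ++ [z]).dropLast = mid := by simp
    have hneg : PySem.List.pyGetD (a :: (mid ++ [z])) (-1) "" = z := by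
      rw [show a :: (mid ++ [z]) = (a :: mid) ++ [z] from by simp]
      exact PySem.List.pyGetD_neg_one_append_singleton _ _ _
    simp only [List.tail_cons, PySem.List.pyGetD_zero_cons, hdl, hneg]
    rw [String.toList_append, String.toList_append, fold_toList]
    have hrep : (a :: (mid ++ [z])).length - 2 = mid.length := by simp
    rw [hrep, List.zip_cons_cons, List.zip_append (by simp)]
    simp only [PySem.Str.toList_join, List.map_cons, List.map_append,
      map_zip_replicate, String.toList_append]
    simp [PySem.Chars.join, List.intercalate, intersperse_nil_flatten, Function.comp_def,
      String.toList_append, List.append_assoc, List.flatMap_def]
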